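-- pv_equiv track=rewrite | github.com/horaciobelardita/tp-derivada | tp derivada polinomio con python/derivar.py | formatear_simple
-- ===== SOURCE A (Python) =====
-- def formatear_simple(funcion):
--     # 3x^2+10x+5
--     salida = ""
--     j = 0
--     for i in range(0, len(funcion)):
--         if funcion[i] in ['+', '-'] and i > 0:
--             if funcion[i-1] != '^':
--                 salida += funcion[j:i] + " "
--                 j = i
--     salida += funcion[j:]
--     return salida
-- ===== SOURCE B (Python) =====
-- def formatear_simple(funcion):
--     out = []
--     prev = None
--     for c in funcion:
--         if c in ('+', '-') and prev is not None and prev != '^':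
--             out.append(' ')
--         out.append(c)
--         prev = c
--     return ''.join(out)
-- ===== Notes on version B (the rewrite author's own statement) =====
-- stated objective: simpler
-- what changed: Replaces A's index loop with slice accumulation and a pending start marker j by a single previous-character pass that emits a space directly before each sign, with no index arithmetic or slicing.
import Mathlib
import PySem

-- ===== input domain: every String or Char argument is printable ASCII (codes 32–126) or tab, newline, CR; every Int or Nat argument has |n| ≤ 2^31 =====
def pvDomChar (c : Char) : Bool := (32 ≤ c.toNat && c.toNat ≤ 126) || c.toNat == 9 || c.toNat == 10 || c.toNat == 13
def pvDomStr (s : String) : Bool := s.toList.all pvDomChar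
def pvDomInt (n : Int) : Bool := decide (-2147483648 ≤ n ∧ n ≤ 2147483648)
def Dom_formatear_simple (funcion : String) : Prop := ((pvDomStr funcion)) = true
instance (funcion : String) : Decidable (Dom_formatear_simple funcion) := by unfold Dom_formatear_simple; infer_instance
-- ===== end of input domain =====

-- B replaces A's index/slice accumulation by a single previous-character pass (objective: simpler).

-- ===== PORT A =====
-- A's loop body: at index i, if funcion[i] is a sign, i>0 and funcion[i-1] != '^',
-- append funcion[j:i] + " " to salida and set j = i.
def pvStepA (cs : List Char) (st : List Char × Int) (i : Int) : List Char × Int :=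
  if (PySem.List.pyGet? cs i = some '+' ∨ PySem.List.pyGet? cs i = some '-') ∧ i > 0 then
    if PySem.List.pyGet? cs (i - 1) ≠ some '^' then
      (st.1 ++ PySem.List.slice cs (some st.2) (some i) ++ [' '], i)
    else st
  else st

def formatear_simple (funcion : String) : String :=
  let cs := funcion.toList
  let st := (PySem.List.pyRange 0 (PySem.List.len cs) 1).foldl (pvStepA cs) ([], 0)
  String.ofList (st.1 ++ PySem.List.slice cs (some st.2) none)

-- ===== PORT B =====
-- B's loop body: emit a space before c when c is a sign and the previous char exists and is not '^'.
def pvStepB (st : List Char × Option Char) (c : Char) : List Char × Option Char :=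
  if (c = '+' ∨ c = '-') ∧ st.2 ≠ none ∧ st.2 ≠ some '^' then
    (st.1 ++ [' ', c], some c)
  else
    (st.1 ++ [c], some c)

def formatear_simple_alt (funcion : String) : String :=
  String.ofList (funcion.toList.foldl pvStepB ([], none)).1

-- ===== PRECONDITION & SPEC =====
def Spec_formatear_simple (funcion : String) (out : String) : Prop := out = formatear_simple_alt funcion
instance (funcion : String) (out : String) : Decidable (Spec_formatear_simple funcion out) := by unfold Spec_formatear_simple; infer_instance

-- ===== CLAIM (what is proved, stated in full; the proofs are below) =====
def Claim_equal_formatear_simple : Prop := ∀ (funcion : String), Dom_formatear_simple funcion → Spec_formatear_simple funcion (formatear_simple funcion)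

-- ===== LEMMAS AND PROOFS =====

-- Invariant tying A's (salida, j) after the first n indices to B's (out, prev) after the first n chars.
theorem pvInv (cs : List Char) (n : Nat) (hn : n ≤ cs.length) :
    ∃ (s : List Char) (j : Nat), j ≤ n ∧
      (PySem.List.pyRange 0 (n : Int) 1).foldl (pvStepA cs) ([], 0) = (s, (j : Int)) ∧
      (cs.take n).foldl pvStepB ([], none) = (s ++ (cs.take n).drop j, (cs.take n).getLast?) := by
  induction n with
  | zero =>
      exact ⟨[], 0, le_refl _, by simp [PySem.List.pyRange_one_eq_nil], by simp⟩
  | succ n ih =>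
      obtain ⟨s, j, hj, hA, hB⟩ := ih (by omega)
      have hlt : n < cs.length := by omega
      have hrange : PySem.List.pyRange 0 ((n + 1 : Nat) : Int) 1
          = PySem.List.pyRange 0 (n : Int) 1 ++ [(n : Int)] := by
        push_cast
        exact PySem.List.pyRange_one_succ_right (by positivity)
      have htake : cs.take (n + 1) = cs.take n ++ [cs[n]] := by
        rw [List.take_add_one, List.getElem?_eq_getElem hlt]; rfl
      have hlen : (cs.take n).length = n := by simp [hlt.le]
      have hprev : (cs.take n).getLast? = if n = 0 then none else some cs[n - 1] := by
        rcases Nat.eq_zero_or_pos n with h0 | h0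
        · simp [h0]
        · rw [List.getLast?_eq_getElem?, hlen, List.getElem?_take_of_lt (by omega),
            List.getElem?_eq_getElem (by omega)]
          simp [Nat.pos_iff_ne_zero.mp h0]
      have hdropj : (cs.take n ++ [cs[n]]).drop j = (cs.take n).drop j ++ [cs[n]] := by
        rw [List.drop_append_of_le_length (by omega)]
      have hlast : (cs.take n ++ [cs[n]]).getLast? = some cs[n] := List.getLast?_concat
      rw [hrange, List.foldl_append, hA, htake, List.foldl_append, hB]
      simp only [List.foldl_cons, List.foldl_nil]
      by_cases hsign : cs[n] = '+' ∨ cs[n] = '-'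
      · by_cases h0 : n = 0
        · -- i = 0: A's guard i > 0 fails; B's prev is none
          subst h0
          have hs : s = [] := by
            have := congrArg Prod.fst hB; simpa using this.symm
          have hj0 : j = 0 := by omega
          refine ⟨s, j, by omega, ?_, ?_⟩
          · simp [pvStepA]
          · simp [pvStepB, hs, hj0]
        · have hn1 : ((n : Int) - 1) = ((n - 1 : Nat) : Int) := by omega
          by_cases hcar : cs[n - 1] = '^'
          · -- sign preceded by '^': neither side inserts a space
            refine ⟨s, j, by omega, ?_, ?_⟩
            · simp [pvStepA, hn1, PySem.List.pyGet?_natCast,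
                List.getElem?_eq_getElem hlt,
                List.getElem?_eq_getElem (show n - 1 < cs.length by omega), hcar]
            · simp [pvStepB, hsign, hprev, h0, hcar]
              rw [htake]
              exact ⟨hdropj.symm, hlast.symm⟩
          · -- sign with a non-'^' predecessor: both insert a space before cs[n]
            refine ⟨s ++ (cs.take n).drop j ++ [' '], n, by omega, ?_, ?_⟩
            · have hslice : PySem.List.slice cs (some (j : Int)) (some (n : Int))
                  = (cs.take n).drop j := by
                rw [PySem.List.slice_natCast, List.drop_take]
              simp only [pvStepA, hn1, PySem.List.pyGet?_natCast,
                List.getElem?_eq_getElem hlt,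
                List.getElem?_eq_getElem (show n - 1 < cs.length by omega)]
              rw [if_pos ⟨by simpa using hsign, by exact_mod_cast Nat.pos_of_ne_zero h0⟩,
                if_pos (by simpa using hcar)]
              rw [hslice]
            · have hdropn : (cs.take n ++ [cs[n]]).drop n = [cs[n]] := by
                rw [List.drop_append_of_le_length (by omega), List.drop_of_length_le (by omega)]
                simp
              simp [pvStepB, hsign, hprev, h0, hcar]
              rw [htake]
              exact ⟨hdropn.symm, hlast.symm⟩
      · -- not a sign: both sides just carry cs[n] along
        refine ⟨s, j, by omega, ?_, ?_⟩
        · simp [pvStepA, PySem.List.pyGet?_natCast, List.getElem?_eq_getElem hlt, hsign]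
        · have hns : ¬ (cs[n] = '+' ∨ cs[n] = '-') := hsign
          simp [pvStepB, hns]
          rw [htake]
          exact ⟨hdropj.symm, hlast.symm⟩

theorem formatear_simple_spec : Claim_equal_formatear_simple := by
  intro funcion _
  unfold Spec_formatear_simple formatear_simple formatear_simple_alt
  obtain ⟨s, j, hj, hA, hB⟩ := pvInv funcion.toList funcion.toList.length (le_refl _)
  rw [List.take_length] at hB
  simp only [PySem.List.len_eq, hA, hB, PySem.List.slice_from_natCast]
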